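-- pv_equiv track=rewrite | github.com/nbelyh/visiowings | visiowings/vba_export.py | _normalize_content
-- ===== SOURCE A (Python) =====
-- def _normalize_content(content):
--     """Normalize content for comparison by removing insignificant differences"""
--     # Split into lines
--     lines = content.splitlines()
--
--     # Strip trailing whitespace from each line and remove empty lines at start/end
--     normalized_lines = [line.rstrip() for line in lines]
--
--     # Remove leading empty lines
--     while normalized_lines and not normalized_lines[0]:
--         normalized_lines.pop(0)
--
--     # Remove trailing empty lines
--     while normalized_lines and not normalized_lines[-1]:
--         normalized_lines.pop()
--
--     # Join with consistent line ending
--     return '\n'.join(normalized_lines)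
-- ===== SOURCE B (Python) =====
-- def _normalize_content(content):
--     """Normalize content for comparison by removing insignificant differences"""
--     return '\n'.join(line.rstrip() for line in content.splitlines()).strip('\n')
-- ===== Notes on version B (the rewrite author's own statement) =====
-- stated objective: simpler
-- what changed: B replaces A's two while-pop trimming loops over the list of normalized lines by joining the rstripped lines once and stripping the newline character from both ends of the joined string.
import Mathlib
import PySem

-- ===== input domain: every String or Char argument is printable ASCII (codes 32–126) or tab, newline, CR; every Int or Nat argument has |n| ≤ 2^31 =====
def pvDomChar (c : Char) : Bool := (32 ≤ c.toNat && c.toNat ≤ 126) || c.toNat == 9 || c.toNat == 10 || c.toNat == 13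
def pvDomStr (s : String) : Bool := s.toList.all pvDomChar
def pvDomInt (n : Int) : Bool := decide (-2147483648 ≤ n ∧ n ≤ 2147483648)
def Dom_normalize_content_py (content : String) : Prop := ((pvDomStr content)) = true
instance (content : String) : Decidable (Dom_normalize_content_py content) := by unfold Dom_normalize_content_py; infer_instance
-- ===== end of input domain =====

-- B replaces A's two while-pop trimming loops over a line list by joining the
-- rstripped lines once and stripping '\n' from both ends of the joined string (objective: simpler).

-- ===== PORT A =====
-- while normalized_lines and not normalized_lines[0]: normalized_lines.pop(0)
def popLeadingEmpty : List String → List String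
  | [] => []
  | x :: rest => if x = "" then popLeadingEmpty rest else x :: rest

-- while normalized_lines and not normalized_lines[-1]: normalized_lines.pop()
def popTrailingEmpty (l : List String) : List String :=
  if l = [] then []
  else if l.getLastD "" = "" then popTrailingEmpty l.dropLast
  else l
termination_by l.length
decreasing_by
  simp only [List.length_dropLast]
  have : l.length ≠ 0 := fun h => ‹l ≠ []› (List.eq_nil_of_length_eq_zero h)
  omega

def normalize_content_py (content : String) : String :=
  let lines := PySem.Str.splitlines content
  let normalized_lines := lines.map PySem.Str.rstrip
  PySem.Str.join "\n" (popTrailingEmpty (popLeadingEmpty normalized_lines))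

-- ===== PORT B =====
def normalize_content_py_alt (content : String) : String :=
  PySem.Str.stripChars
    (PySem.Str.join "\n" ((PySem.Str.splitlines content).map PySem.Str.rstrip)) "\n"

-- ===== PRECONDITION & SPEC =====
def Spec_normalize_content_py (content : String) (out : String) : Prop := out = normalize_content_py_alt content
instance (content : String) (out : String) : Decidable (Spec_normalize_content_py content out) := by unfold Spec_normalize_content_py; infer_instance

-- ===== CLAIM (what is proved, stated in full; the proofs are below) =====
def Claim_equal_normalize_content_py : Prop := ∀ (content : String), Dom_normalize_content_py content → Spec_normalize_content_py content (normalize_content_py content)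

-- ===== LEMMAS AND PROOFS =====

-- char-level analogue of popLeadingEmpty
def dEF : List (List Char) → List (List Char)
  | [] => []
  | x :: r => if x = [] then dEF r else x :: r

theorem mem_dEF {L : List (List Char)} {p : List Char} (h : p ∈ dEF L) : p ∈ L := by
  induction L with
  | nil => simpa [dEF] using h
  | cons x r ih =>
    by_cases hx : x = [] <;> simp [dEF, hx] at h
    · exact List.mem_cons_of_mem _ (ih h)
    · rcases h with h | h
      · simp [h]
      · exact List.mem_cons_of_mem _ h

theorem dEF_map_reverse (L : List (List Char)) :
    dEF (L.map List.reverse) = (dEF L).map List.reverse := by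
  induction L with
  | nil => simp [dEF]
  | cons x r ih =>
    by_cases hx : x = []
    · simp [dEF, hx, ih]
    · have : x.reverse ≠ [] := by simpa using hx
      simp [dEF, hx, this]

theorem intercalate_cons₂ (sep x y : List Char) (xs : List (List Char)) :
    sep.intercalate (x :: y :: xs) = x ++ sep ++ sep.intercalate (y :: xs) := by
  simp [List.intercalate, List.intersperse]

theorem intercalate_snoc (sep z : List Char) :
    ∀ (M : List (List Char)), M ≠ [] →
      sep.intercalate (M ++ [z]) = sep.intercalate M ++ sep ++ z := by
  intro M
  induction M with
  | nil => intro h; exact absurd rfl h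
  | cons x M ih =>
    intro _
    cases M with
    | nil => simp [List.intercalate]
    | cons y M' =>
      have ih' := ih (by simp)
      calc sep.intercalate ((x :: y :: M') ++ [z])
          = x ++ sep ++ sep.intercalate ((y :: M') ++ [z]) := by
            rw [show (x :: y :: M') ++ [z] = x :: y :: (M' ++ [z]) from rfl,
              intercalate_cons₂]
            simp
        _ = x ++ sep ++ (sep.intercalate (y :: M') ++ sep ++ z) := by rw [ih']
        _ = sep.intercalate (x :: y :: M') ++ sep ++ z := by
            rw [intercalate_cons₂]; simp

theorem reverse_intercalate (sep : List Char) :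
    ∀ (L : List (List Char)),
      (sep.intercalate L).reverse = sep.reverse.intercalate (L.reverse.map List.reverse) := by
  intro L
  induction L with
  | nil => simp [List.intercalate]
  | cons x L ih =>
    cases L with
    | nil => simp [List.intercalate]
    | cons y L' =>
      have hne : ((y :: L').reverse.map List.reverse) ≠ [] := by simp
      rw [intercalate_cons₂, List.reverse_append, List.reverse_append, ih,
        ← List.append_assoc, ← intercalate_snoc _ _ _ hne]
      simp

theorem dropWhile_nl_eq_self {x : List Char} (h : '\n' ∉ x) :
    x.dropWhile (fun c => (['\n'] : List Char).contains c) = x := by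
  cases x with
  | nil => rfl
  | cons c cs =>
    have hc : c ≠ '\n' := fun hh => h (by simp [hh])
    exact List.dropWhile_cons_of_neg (by simpa using hc)

theorem front (L : List (List Char)) (hL : ∀ p ∈ L, '\n' ∉ p) :
    (['\n'].intercalate L).dropWhile (fun c => (['\n'] : List Char).contains c)
      = ['\n'].intercalate (dEF L) := by
  induction L with
  | nil => simp [List.intercalate, dEF]
  | cons x L ih =>
    have hx' : '\n' ∉ x := hL x (by simp)
    have hL' : ∀ p ∈ L, '\n' ∉ p := fun p hp => hL p (List.mem_cons_of_mem _ hp)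
    cases L with
    | nil =>
      by_cases hx : x = []
      · simp [List.intercalate, dEF, hx]
      · rw [show (['\n'] : List Char).intercalate [x] = x from by simp [List.intercalate],
          dropWhile_nl_eq_self hx', show dEF [x] = [x] from by simp [dEF, hx]]
        simp [List.intercalate]
    | cons y L' =>
      by_cases hx : x = []
      · rw [intercalate_cons₂]
        simp only [hx, List.nil_append]
        rw [show (['\n'] : List Char) ++ ['\n'].intercalate (y :: L')
              = '\n' :: ['\n'].intercalate (y :: L') from rfl]
        rw [List.dropWhile_cons_of_pos (by decide), ih hL']
        simp [dEF]
      · rw [intercalate_cons₂, List.append_assoc, List.dropWhile_append,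
          dropWhile_nl_eq_self hx']
        simp only [List.isEmpty_iff, hx, if_false]
        rw [show dEF (x :: y :: L') = x :: y :: L' from by simp [dEF, hx],
          intercalate_cons₂]
        simp

theorem stripChars_join (L : List (List Char)) (hL : ∀ p ∈ L, '\n' ∉ p) :
    PySem.Chars.stripChars (PySem.Chars.join ['\n'] L) ['\n']
      = PySem.Chars.join ['\n'] ((dEF (dEF L).reverse).reverse) := by
  have hL2 : ∀ p ∈ (dEF L).reverse.map List.reverse, '\n' ∉ p := by
    intro p hp
    rcases List.mem_map.mp hp with ⟨q, hq, rfl⟩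
    have : q ∈ L := mem_dEF (List.mem_reverse.mp hq)
    simpa using hL q this
  unfold PySem.Chars.stripChars PySem.Chars.join
  show (List.dropWhile (fun c => (['\n'] : List Char).contains c)
      (List.dropWhile (fun c => (['\n'] : List Char).contains c)
        (['\n'].intercalate L)).reverse).reverse = _
  rw [front L hL, reverse_intercalate, show (['\n'] : List Char).reverse = ['\n'] from rfl,
    front _ hL2, dEF_map_reverse, reverse_intercalate,
    show (['\n'] : List Char).reverse = ['\n'] from rfl]
  congr 1
  simp [List.map_reverse]

theorem go_no_nl (isB : Char → Bool) (hB : isB '\n' = true) :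
    ∀ (cs cur : List Char) (acc : List (List Char)), '\n' ∉ cur → (∀ q ∈ acc, '\n' ∉ q) →
      ∀ q ∈ PySem.Chars.splitlines.go isB cs cur acc, '\n' ∉ q := by
  intro cs cur acc
  induction cs, cur, acc using PySem.Chars.splitlines.go.induct isB with
  | case1 cur acc hcur =>
    intro _ hacc q hq
    rw [PySem.Chars.splitlines.go] at hq
    simp only [hcur, if_true, List.mem_reverse] at hq
    exact hacc q hq
  | case2 cur acc hcur =>
    intro hc hacc q hq
    rw [PySem.Chars.splitlines.go] at hq
    simp only [hcur, Bool.false_eq_true, if_false, List.mem_reverse, List.mem_cons] at hq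
    rcases hq with rfl | hq
    · simpa using hc
    · exact hacc q hq
  | case3 rest cur acc ih =>
    intro hc hacc q hq
    refine ih (by simp) (fun q' hq' => ?_) q hq
    rcases List.mem_cons.mp hq' with rfl | hq'
    · simpa using hc
    · exact hacc q' hq'
  | case4 c rest cur acc hne hc ih =>
    intro hcur hacc q hq
    rw [PySem.Chars.splitlines.go] at hq
    split at hq
    · refine ih (by simp) (fun q' hq' => ?_) q hq
      rcases List.mem_cons.mp hq' with rfl | hq'
      · simpa using hcur
      · exact hacc q' hq'
    · exact absurd hc (by assumption)
    · exact fun r h1 h2 => hne r h1 h2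
  | case5 c rest cur acc hne hc ih =>
    intro hcur hacc q hq
    rw [PySem.Chars.splitlines.go] at hq
    split at hq
    · exact absurd (by assumption) hc
    · refine ih (fun hmem => ?_) hacc q hq
      rcases List.mem_cons.mp hmem with h | h
      · rename_i hcfalse
        exact hcfalse (h ▸ hB)
      · exact hcur h
    · exact fun r h1 h2 => hne r h1 h2

theorem splitlines_no_nl (cs : List Char) :
    ∀ q ∈ PySem.Chars.splitlines cs, '\n' ∉ q := by
  unfold PySem.Chars.splitlines
  exact go_no_nl _ (by decide) cs [] [] (by simp) (by simp)

theorem rstrip_no_nl {q : List Char} (h : '\n' ∉ q) : '\n' ∉ PySem.Chars.rstrip q := by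
  unfold PySem.Chars.rstrip
  intro hmem
  exact h (List.mem_reverse.mp ((List.dropWhile_sublist _).mem (List.mem_reverse.mp hmem)))

theorem popLeading_toList (l : List String) :
    (popLeadingEmpty l).map String.toList = dEF (l.map String.toList) := by
  induction l with
  | nil => simp [popLeadingEmpty, dEF]
  | cons x r ih =>
    by_cases hx : x = ""
    · simp [popLeadingEmpty, dEF, hx, ih]
    · have hx' : x.toList ≠ [] := fun h => hx (String.toList_eq_nil_iff.mp h)
      simp [popLeadingEmpty, dEF, hx, hx']

theorem popTrailing_rev (l : List String) :
    popTrailingEmpty l = (popLeadingEmpty l.reverse).reverse := by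
  induction l using List.reverseRecOn with
  | nil => simp [popTrailingEmpty, popLeadingEmpty]
  | append_singleton xs x ih =>
    rw [popTrailingEmpty]
    have hne : xs ++ [x] ≠ [] := by simp
    simp only [hne, if_false, List.getLastD_concat, List.dropLast_concat,
      List.reverse_append, List.reverse_cons, List.reverse_nil, List.nil_append,
      List.cons_append, List.nil_append]
    by_cases hx : x = ""
    · simp [hx, popLeadingEmpty, ih]
    · simp [hx, popLeadingEmpty]

-- ===== VERDICT (by name: the statement is the Claim_ definition above) =====
theorem normalize_content_py_spec : Claim_equal_normalize_content_py := by
  intro content _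
  unfold Spec_normalize_content_py normalize_content_py normalize_content_py_alt
  simp only [PySem.Str.join, PySem.Str.stripChars, PySem.Str.splitlines, String.toList_ofList]
  rw [show ("\n" : String).toList = ['\n'] from rfl]
  congr 1
  set L : List (List Char) :=
    ((PySem.Chars.splitlines content.toList).map String.ofList).map
      (fun s => (PySem.Str.rstrip s).toList) with hLdef
  have hL : ∀ p ∈ ((PySem.Chars.splitlines content.toList).map String.ofList).map PySem.Str.rstrip,
      '\n' ∉ p.toList := by
    intro p hp
    rcases List.mem_map.mp hp with ⟨s, hs, rfl⟩
    rcases List.mem_map.mp hs with ⟨q, hq, rfl⟩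
    rw [PySem.Str.rstrip, String.toList_ofList, String.toList_ofList]
    exact rstrip_no_nl (splitlines_no_nl _ q hq)
  rw [stripChars_join _ (by
    intro p hp
    rcases List.mem_map.mp hp with ⟨s, hs, rfl⟩
    exact hL s hs)]
  rw [popTrailing_rev, List.map_reverse, popLeading_toList, List.map_reverse,
    popLeading_toList]
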